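-- pv_equiv track=rewrite | github.com/dqgthb/algorithms | 2839/main.py | solve
-- ===== SOURCE A (Python) =====
-- def solve(w):
--
--     bag3 = 0
--     while True:
--         a, b = divmod(w, 5)
--         if b == 0:
--             return a + bag3
--         else:
--             if w >= 3:
--                 w -= 3
--                 bag3 += 1
--             else:
--                 return -1
-- ===== SOURCE B (Python) =====
-- def solve(w):
--     # closed form: k = smallest number of 3-bags making the rest divisible by 5
--     k = (2 * w) % 5          # 2 is the inverse of 3 mod 5
--     v = w - 3 * k
--     if k == 0 or v >= 0:
--         return v // 5 + k
--     return -1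
-- ===== Notes on version B (the rewrite author's own statement) =====
-- stated objective: simpler
-- what changed: Replaces the subtract-three-in-a-loop search with a closed modular-arithmetic formula: the needed count of three-bags is computed directly via the modular inverse of three mod five, with a single branch for the infeasible case.
import Mathlib
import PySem

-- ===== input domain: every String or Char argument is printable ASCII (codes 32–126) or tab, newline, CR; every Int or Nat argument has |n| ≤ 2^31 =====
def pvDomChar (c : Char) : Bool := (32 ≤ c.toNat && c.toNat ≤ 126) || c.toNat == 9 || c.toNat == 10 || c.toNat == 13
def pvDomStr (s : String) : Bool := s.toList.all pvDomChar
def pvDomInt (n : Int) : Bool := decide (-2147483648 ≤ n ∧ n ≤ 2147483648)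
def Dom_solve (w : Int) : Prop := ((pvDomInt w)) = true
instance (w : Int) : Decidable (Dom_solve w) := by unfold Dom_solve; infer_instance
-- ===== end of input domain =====

-- B replaces A's subtract-3 loop with a closed modular-arithmetic formula (objective: simpler).

-- ===== PORT A =====
-- A's `while True` loop: each pass computes divmod(w, 5), returns on remainder 0,
-- otherwise subtracts 3 (and counts a bag) while w >= 3, else returns -1.
-- Terminates because w.toNat strictly decreases (w ≥ 3 on the recursive call).
def solveLoop (w bag3 : Int) : Int :=
  let a := PySem.Int.floordiv w 5
  let b := PySem.Int.mod w 5
  if b = 0 then a + bag3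
  else if w ≥ 3 then solveLoop (w - 3) (bag3 + 1)
  else -1
termination_by w.toNat
decreasing_by omega

def solve (w : Int) : Int := solveLoop w 0

-- ===== PORT B =====
def solve_alt (w : Int) : Int :=
  let k := PySem.Int.mod (2 * w) 5
  let v := w - 3 * k
  if k = 0 ∨ v ≥ 0 then PySem.Int.floordiv v 5 + k
  else -1

-- ===== PRECONDITION & SPEC =====
def Spec_solve (w : Int) (out : Int) : Prop := out = solve_alt w
instance (w : Int) (out : Int) : Decidable (Spec_solve w out) := by unfold Spec_solve; infer_instance

-- ===== CLAIM (what is proved, stated in full; the proofs are below) =====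
def Claim_equal_solve : Prop := ∀ (w : Int), Dom_solve w → Spec_solve w (solve w)

-- ===== LEMMAS AND PROOFS =====
theorem solveLoop_unfold' (w bag3 : Int) :
    solveLoop w bag3 =
      if w % 5 = 0 then w / 5 + bag3
      else if w ≥ 3 then solveLoop (w - 3) (bag3 + 1)
      else -1 := by
  rw [solveLoop]
  simp only [PySem.Int.mod_eq_emod_of_pos (show (0:Int) < 5 by norm_num),
             PySem.Int.floordiv_eq_ediv_of_pos (show (0:Int) < 5 by norm_num)]

set_option maxHeartbeats 1000000 in
theorem solveLoop_eq_alt (w : Int) : solveLoop w 0 = solve_alt w := by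
  have e : ∀ a : Int, PySem.Int.mod a 5 = a % 5 :=
    fun a => PySem.Int.mod_eq_emod_of_pos (by norm_num)
  have e2 : ∀ a : Int, PySem.Int.floordiv a 5 = a / 5 :=
    fun a => PySem.Int.floordiv_eq_ediv_of_pos (by norm_num)
  obtain ⟨q, r, rfl, hr0, hr5⟩ : ∃ q r, w = 5 * q + r ∧ 0 ≤ r ∧ r < 5 :=
    ⟨w / 5, w % 5, by omega, by omega, by omega⟩
  simp only [solve_alt, e, e2]
  interval_cases r
  · have hk : (2 * (5 * q + 0)) % 5 = 0 := by omega
    rw [hk]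
    rw [solveLoop_unfold', if_pos (by omega), if_pos (by omega)]
    omega
  · have hk : (2 * (5 * q + 1)) % 5 = 2 := by omega
    rw [hk]
    rw [solveLoop_unfold', if_neg (by omega)]
    by_cases h0 : 5 * q + 1 - 3 * 0 ≥ 3
    · rw [if_pos (by omega)]
      rw [solveLoop_unfold', if_neg (by omega)]
      by_cases h1 : 5 * q + 1 - 3 * 1 ≥ 3
      · rw [if_pos (by omega)]
        rw [solveLoop_unfold', if_pos (by omega), if_pos (by omega)]
        omega
      · rw [if_neg (by omega), if_neg (by omega)]
    · rw [if_neg (by omega), if_neg (by omega)]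
  · have hk : (2 * (5 * q + 2)) % 5 = 4 := by omega
    rw [hk]
    rw [solveLoop_unfold', if_neg (by omega)]
    by_cases h0 : 5 * q + 2 - 3 * 0 ≥ 3
    · rw [if_pos (by omega)]
      rw [solveLoop_unfold', if_neg (by omega)]
      by_cases h1 : 5 * q + 2 - 3 * 1 ≥ 3
      · rw [if_pos (by omega)]
        rw [solveLoop_unfold', if_neg (by omega)]
        by_cases h2 : 5 * q + 2 - 3 * 2 ≥ 3
        · rw [if_pos (by omega)]
          rw [solveLoop_unfold', if_neg (by omega)]
          by_cases h3 : 5 * q + 2 - 3 * 3 ≥ 3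
          · rw [if_pos (by omega)]
            rw [solveLoop_unfold', if_pos (by omega), if_pos (by omega)]
            omega
          · rw [if_neg (by omega), if_neg (by omega)]
        · rw [if_neg (by omega), if_neg (by omega)]
      · rw [if_neg (by omega), if_neg (by omega)]
    · rw [if_neg (by omega), if_neg (by omega)]
  · have hk : (2 * (5 * q + 3)) % 5 = 1 := by omega
    rw [hk]
    rw [solveLoop_unfold', if_neg (by omega)]
    by_cases h0 : 5 * q + 3 - 3 * 0 ≥ 3
    · rw [if_pos (by omega)]
      rw [solveLoop_unfold', if_pos (by omega), if_pos (by omega)]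
      omega
    · rw [if_neg (by omega), if_neg (by omega)]
  · have hk : (2 * (5 * q + 4)) % 5 = 3 := by omega
    rw [hk]
    rw [solveLoop_unfold', if_neg (by omega)]
    by_cases h0 : 5 * q + 4 - 3 * 0 ≥ 3
    · rw [if_pos (by omega)]
      rw [solveLoop_unfold', if_neg (by omega)]
      by_cases h1 : 5 * q + 4 - 3 * 1 ≥ 3
      · rw [if_pos (by omega)]
        rw [solveLoop_unfold', if_neg (by omega)]
        by_cases h2 : 5 * q + 4 - 3 * 2 ≥ 3
        · rw [if_pos (by omega)]
          rw [solveLoop_unfold', if_pos (by omega), if_pos (by omega)]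
          omega
        · rw [if_neg (by omega), if_neg (by omega)]
      · rw [if_neg (by omega), if_neg (by omega)]
    · rw [if_neg (by omega), if_neg (by omega)]

-- ===== VERDICT (by name: the statement is the Claim_ definition above) =====
theorem solve_spec : Claim_equal_solve := by
  intro w _
  unfold Spec_solve solve
  exact solveLoop_eq_alt w
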